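-- pv_equiv track=rewrite | github.com/jdahlin/medical-notes | content/scripts/fix_index_and_cleanup.py | dedupe_extra_frontmatter
-- ===== SOURCE A (Python) =====
-- def dedupe_extra_frontmatter(text: str) -> str:
--     lines = text.splitlines()
--     result = []
--     i = 0
--     # keep first frontmatter (if at top)
--     if i < len(lines) and lines[i].strip() == '---':
--         result.append(lines[i]); i += 1
--         while i < len(lines):
--             result.append(lines[i])
--             if lines[i].strip() == '---':
--                 i += 1
--                 break
--             i += 1
--     # now copy the rest but strip any further '---' blocks
--     in_block = False
--     while i < len(lines):
--         if lines[i].strip() == '---':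
--             in_block = not in_block
--             i += 1
--             continue
--         if not in_block:
--             result.append(lines[i])
--         i += 1
--     return '\n'.join(result) + ('\n' if text.endswith('\n') else '')
-- ===== SOURCE B (Python) =====
-- def dedupe_extra_frontmatter(text: str) -> str:
--     lines = text.splitlines()
--     stripped = [ln.strip() for ln in lines]
--     # split off the kept top frontmatter block with an index lookup over the table
--     if stripped and stripped[0] == '---':
--         try:
--             j = stripped[1:].index('---') + 2
--         except ValueError:
--             j = len(lines)
--         head, body = lines[:j], lines[j:]
--     else:
--         head, body = [], lines
--     # split the body on delimiter lines and keep the even-position segments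
--     kept = head + [ln for seg in _segments(body)[0::2] for ln in seg]
--     out = '\n'.join(kept)
--     return out + ('\n' if text.endswith('\n') else '')
--
--
-- def _segments(body):
--     segs = []
--     cur = []
--     for ln in body:
--         if ln.strip() == '---':
--             segs.append(cur)
--             cur = []
--         else:
--             cur.append(ln)
--     segs.append(cur)
--     return segs
-- ===== Notes on version B (the rewrite author's own statement) =====
-- stated objective: alternative
-- what changed: A fuses everything into two sequential while-loops with a toggling in_block flag; B instead precomputes the stripped-line table, cuts off the top frontmatter with a single index lookup and slices, then splits the body into delimiter-separated segments and keeps the even-position ones (segs[0::2]).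
import Mathlib
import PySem

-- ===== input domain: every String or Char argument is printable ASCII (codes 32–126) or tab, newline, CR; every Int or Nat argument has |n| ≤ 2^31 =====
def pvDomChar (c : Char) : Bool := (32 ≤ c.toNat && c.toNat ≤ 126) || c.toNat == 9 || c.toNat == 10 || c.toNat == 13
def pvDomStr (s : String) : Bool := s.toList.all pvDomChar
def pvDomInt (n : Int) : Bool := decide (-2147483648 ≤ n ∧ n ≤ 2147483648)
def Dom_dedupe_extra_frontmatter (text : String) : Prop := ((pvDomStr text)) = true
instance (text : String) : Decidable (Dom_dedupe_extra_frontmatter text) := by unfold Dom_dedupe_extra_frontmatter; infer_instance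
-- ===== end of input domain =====

-- B strips duplicate frontmatter by an index lookup for the top block plus splitting the body
-- into delimiter-separated segments and keeping the even ones (objective: alternative decomposition).

-- ===== PORT A =====
-- A's first while loop: append every line, stop right after appending a '---' line;
-- returns (appended lines, remaining lines)
def aTopLoop : List String → List String × List String
  | [] => ([], [])
  | l :: ls =>
    if PySem.Str.strip l = "---" then ([l], ls)
    else
      let q := aTopLoop ls
      (l :: q.1, q.2)

-- A's second while loop with the in_block flag
def aRest : List String → Bool → List String
  | [], _ => []
  | l :: ls, inb =>
    if PySem.Str.strip l = "---" then aRest ls (!inb)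
    else if inb then aRest ls inb
    else l :: aRest ls inb

-- A's body on the split lines: (result of the first phase, remaining lines), then the flag loop
def aKept (lines : List String) : List String :=
  let p :=
    match lines with
    | [] => (([] : List String), ([] : List String))
    | l :: ls =>
      if PySem.Str.strip l = "---" then
        let q := aTopLoop ls
        (l :: q.1, q.2)
      else ([], l :: ls)
  p.1 ++ aRest p.2 false

def dedupe_extra_frontmatter (text : String) : String :=
  PySem.Str.join "\n" (aKept (PySem.Str.splitlines text)) ++
    (if PySem.Str.endswith text "\n" then "\n" else "")

-- ===== PORT B =====
-- Source B's _segments loop: state (segs, cur); finally appends cur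
def bSegLoop : List String → List (List String) → List String → List (List String)
  | [], segs, cur => segs ++ [cur]
  | l :: ls, segs, cur =>
    if PySem.Str.strip l = "---" then bSegLoop ls (segs ++ [cur]) []
    else bSegLoop ls segs (cur ++ [l])

def bSegments (body : List String) : List (List String) := bSegLoop body [] []

-- segs[0::2]
def everyOther : List (List String) → List (List String)
  | [] => []
  | [x] => [x]
  | x :: _ :: xs => x :: everyOther xs

-- Source B's body on the split lines
def bKept (lines : List String) : List String :=
  let stripped := lines.map PySem.Str.strip
  let p :=
    match stripped with
    | [] => (([] : List String), lines)
    | s :: rest =>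
      if s = "---" then
        -- j = stripped[1:].index('---') + 2, or len(lines) if absent;
        -- lines[:j]/lines[j:] = take/drop, exact since 0 ≤ j ≤ len(lines)
        let j := match PySem.List.index? rest "---" with
                 | some k => k + 2
                 | none => lines.length
        (lines.take j, lines.drop j)
      else ([], lines)
  p.1 ++ (everyOther (bSegments p.2)).flatten

def dedupe_extra_frontmatter_alt (text : String) : String :=
  PySem.Str.join "\n" (bKept (PySem.Str.splitlines text)) ++
    (if PySem.Str.endswith text "\n" then "\n" else "")

-- ===== PRECONDITION & SPEC =====
def Spec_dedupe_extra_frontmatter (text : String) (out : String) : Prop := out = dedupe_extra_frontmatter_alt text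
instance (text : String) (out : String) : Decidable (Spec_dedupe_extra_frontmatter text out) := by unfold Spec_dedupe_extra_frontmatter; infer_instance

-- ===== CLAIM (what is proved, stated in full; the proofs are below) =====
def Claim_equal_dedupe_extra_frontmatter : Prop := ∀ (text : String), Dom_dedupe_extra_frontmatter text → Spec_dedupe_extra_frontmatter text (dedupe_extra_frontmatter text)

-- ===== LEMMAS AND PROOFS =====

-- clean recursive segment splitter (proof-only)
def segRec : List String → List (List String)
  | [] => [[]]
  | l :: ls =>
    if PySem.Str.strip l = "---" then [] :: segRec ls
    else
      match segRec ls with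
      | s :: rest => (l :: s) :: rest
      | [] => [[l]]

theorem segRec_ne_nil (ls : List String) : segRec ls ≠ [] := by
  cases ls with
  | nil => simp [segRec]
  | cons l ls =>
    unfold segRec
    split
    · simp
    · cases h : segRec ls <;> simp

theorem bSegLoop_eq (ls : List String) : ∀ segs cur,
    bSegLoop ls segs cur =
      segs ++ ((cur ++ (segRec ls).headI) :: (segRec ls).tail) := by
  induction ls with
  | nil => intro segs cur; simp [bSegLoop, segRec]
  | cons l ls ih =>
    intro segs cur
    unfold bSegLoop segRec
    split
    · rw [ih]
      rcases h : segRec ls with _ | ⟨s, rest⟩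
      · exact absurd h (segRec_ne_nil ls)
      · simp
    · rw [ih]
      rcases h : segRec ls with _ | ⟨s, rest⟩
      · exact absurd h (segRec_ne_nil ls)
      · simp

theorem bSegments_eq (body : List String) : bSegments body = segRec body := by
  rw [bSegments, bSegLoop_eq]
  rcases h : segRec body with _ | ⟨s, rest⟩
  · exact absurd h (segRec_ne_nil body)
  · simp

-- the in_block loop of A keeps exactly the even (resp. odd) segments
theorem aRest_eq (ls : List String) :
    aRest ls false = (everyOther (segRec ls)).flatten ∧
    aRest ls true = (everyOther ((segRec ls).tail)).flatten := by
  induction ls with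
  | nil => simp [aRest, segRec, everyOther]
  | cons l ls ih =>
    unfold aRest segRec
    rcases h : segRec ls with _ | ⟨s, rest⟩
    · exact absurd h (segRec_ne_nil ls)
    · split
      · refine ⟨?_, ?_⟩
        · rw [show (!false) = true from rfl, ih.2, h]
          rcases rest with _ | ⟨r, rs⟩ <;> simp [everyOther]
        · rw [show (!true) = false from rfl, ih.1, h]
          simp
      · refine ⟨?_, ?_⟩
        · rw [if_neg (by decide), ih.1, h]
          rcases rest with _ | ⟨r, rs⟩ <;> simp [everyOther]
        · rw [if_pos rfl, ih.2, h]
          simp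

-- A's top loop as take/drop at the first delimiter
theorem aTopLoop_eq (ls : List String) :
    aTopLoop ls =
      match PySem.List.index? (ls.map PySem.Str.strip) "---" with
      | some k => (ls.take (k + 1), ls.drop (k + 1))
      | none => (ls, []) := by
  induction ls with
  | nil => simp [aTopLoop, PySem.List.index?_eq_idxOf?]
  | cons l ls ih =>
    unfold aTopLoop
    rw [PySem.List.index?_eq_idxOf?] at *
    by_cases h : PySem.Str.strip l = "---"
    · simp [List.idxOf?_cons, h]
    · rw [ih]
      cases hk : List.idxOf? "---" (ls.map PySem.Str.strip) with
      | none => simp [List.idxOf?_cons, hk, h]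
      | some k => simp [List.idxOf?_cons, hk, h]

theorem kept_eq (lines : List String) : aKept lines = bKept lines := by
  cases lines with
  | nil => simp [aKept, bKept, aRest, bSegments, bSegLoop, everyOther]
  | cons l ls =>
    rw [aKept, bKept]
    by_cases h : PySem.Str.strip l = "---"
    · simp only [List.map_cons, h]
      rw [aTopLoop_eq, PySem.List.index?_eq_idxOf?]
      cases hk : List.idxOf? "---" (ls.map PySem.Str.strip) with
      | some k =>
        rw [bSegments_eq, (aRest_eq _).1]
        simp [List.take_succ_cons, List.drop_succ_cons]
      | none =>
        rw [bSegments_eq, (aRest_eq _).1]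
        simp [segRec, everyOther, List.take_of_length_le, List.drop_of_length_le]
    · simp only [List.map_cons, if_neg h]
      rw [bSegments_eq, (aRest_eq _).1]

-- ===== VERDICT (by name: the statement is the Claim_ definition above) =====
theorem dedupe_extra_frontmatter_spec : Claim_equal_dedupe_extra_frontmatter := by
  intro text _
  unfold Spec_dedupe_extra_frontmatter dedupe_extra_frontmatter dedupe_extra_frontmatter_alt
  rw [kept_eq]
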